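-- pv_equiv track=rewrite | github.com/Lethios/solutions-archive | solutions/1513.py | numSub
-- ===== SOURCE A (Python) =====
-- def numSub(s: str) -> int:
--     count = substrings = 0
--
--     for i, num in enumerate(s):
--         if num == "1":
--             count += 1
--         else:
--             substrings += (count * (count + 1)) // 2
--             count = 0
--
--     substrings += (count * (count + 1)) // 2
--
--     return substrings % (10**9 + 7)
-- ===== SOURCE B (Python) =====
-- def numSub(s: str) -> int:
--     runs = "".join(c if c == "1" else "0" for c in s).split("0")
--     return sum(len(r) * (len(r) + 1) // 2 for r in runs) % (10**9 + 7)
-- ===== Notes on version B (the rewrite author's own statement) =====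
-- stated objective: simpler
-- what changed: B normalises every non-'1' char to '0', splits the string into maximal 1-runs with str.split, and sums the triangular number of each run length, replacing A's char-by-char scan with a reset-on-non-'1' accumulator branch.
import Mathlib
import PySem

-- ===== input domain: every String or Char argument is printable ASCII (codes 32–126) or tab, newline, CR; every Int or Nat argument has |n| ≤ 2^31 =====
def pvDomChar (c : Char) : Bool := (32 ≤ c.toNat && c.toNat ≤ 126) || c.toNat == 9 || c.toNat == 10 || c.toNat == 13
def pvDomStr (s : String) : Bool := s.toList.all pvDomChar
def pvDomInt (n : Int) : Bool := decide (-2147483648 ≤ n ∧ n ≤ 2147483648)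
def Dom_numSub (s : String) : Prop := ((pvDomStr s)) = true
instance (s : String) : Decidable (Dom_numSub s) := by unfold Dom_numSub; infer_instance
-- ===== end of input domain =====

-- B replaces A's char-by-char scan (accumulator with a reset-on-non-'1' branch) by: normalise to a
-- 0/1 string, split into the maximal 1-runs, and sum the triangular number of each run's length.

-- ===== PORT A =====
-- A's loop: count of the current 1-run and the running substring total; reset branch on non-'1'.
def numSub (s : String) : Int :=
  let st := s.toList.foldl
    (fun (p : Int × Int) (num : Char) =>
      if num = '1' then (p.1 + 1, p.2)
      else (0, p.2 + PySem.Int.floordiv (p.1 * (p.1 + 1)) 2))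
    (0, 0)
  PySem.Int.mod (st.2 + PySem.Int.floordiv (st.1 * (st.1 + 1)) 2) (10 ^ 9 + 7)

-- ===== PORT B =====
-- ''.join(c if c == '1' else '0' for c in s).split('0')  →  List.splitOn '0' over the normalised chars
def numSub_alt (s : String) : Int :=
  let runs := List.splitOn '0' (s.toList.map (fun c => if c = '1' then c else '0'))
  PySem.Int.mod
    ((runs.map (fun r => PySem.Int.floordiv ((r.length : Int) * ((r.length : Int) + 1)) 2)).sum)
    (10 ^ 9 + 7)

-- ===== PRECONDITION & SPEC =====
def Spec_numSub (s : String) (out : Int) : Prop := out = numSub_alt s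
instance (s : String) (out : Int) : Decidable (Spec_numSub s out) := by unfold Spec_numSub; infer_instance

-- ===== CLAIM (what is proved, stated in full; the proofs are below) =====
def Claim_equal_numSub : Prop := ∀ (s : String), Dom_numSub s → Spec_numSub s (numSub s)

-- ===== LEMMAS AND PROOFS =====

-- the triangular-number term both ports use
def pvTri (n : Int) : Int := PySem.Int.floordiv (n * (n + 1)) 2

def pvStep (p : Int × Int) (num : Char) : Int × Int :=
  if num = '1' then (p.1 + 1, p.2) else (0, p.2 + pvTri p.1)

def pvS (rs : List (List Char)) : Int := (rs.map (fun r => pvTri (r.length : Int))).sum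

lemma pvS_cons (r : List Char) (rs : List (List Char)) : pvS (r :: rs) = pvTri (r.length : Int) + pvS rs := by
  simp [pvS]

lemma pv_modifyHead_comp (f g : List Char → List Char) (rs : List (List Char)) :
    List.modifyHead f (List.modifyHead g rs) = List.modifyHead (fun r => f (g r)) rs := by
  cases rs <;> rfl

lemma pv_modifyHead_id (rs : List (List Char)) : List.modifyHead (fun r => r) rs = rs := by
  cases rs <;> rfl

lemma pv_key (l : List Char) (k : Nat) (acc : Int) :
    (l.foldl pvStep ((k : Int), acc)).2 + pvTri (l.foldl pvStep ((k : Int), acc)).1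
      = acc + pvS (List.modifyHead (fun r => List.replicate k '1' ++ r)
          (List.splitOnP (fun c => c == '0') (l.map (fun c => if c = '1' then c else '0')))) := by
  induction l generalizing k acc with
  | nil => simp [pvS, List.splitOnP_nil]
  | cons c l ih =>
    by_cases hc : c = '1'
    · subst hc
      have hcast : ((k : Int) + 1) = ((k + 1 : Nat) : Int) := by push_cast; ring
      simp only [List.foldl_cons, pvStep, List.map_cons, List.splitOnP_cons, reduceIte,
        Char.reduceBEq, Bool.false_eq_true, if_false]
      have hf : (fun r : List Char => List.replicate (k + 1) '1' ++ r)
          = (fun r : List Char => List.replicate k '1' ++ '1' :: r) := by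
        funext r
        simp [List.replicate_succ', List.append_assoc]
      rw [hcast, ih (k + 1) acc, pv_modifyHead_comp, hf]
    · have h0 := ih 0 (acc + pvTri (k : Int))
      simp only [List.foldl_cons, pvStep, if_neg hc]
      rw [show (0 : Int) = ((0 : Nat) : Int) from rfl, h0]
      simp only [List.map_cons, if_neg hc, List.splitOnP_cons, Char.reduceBEq, if_true,
        pv_modifyHead_id, List.replicate, List.nil_append]
      cases List.splitOnP (fun c => c == '0') (List.map (fun c => if c = '1' then c else '0') l) with
      | nil => simp [pvS, List.modifyHead]
      | cons r rs =>
        simp only [List.modifyHead, pvS_cons, List.length_append, List.length_replicate,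
          List.length_nil, Nat.add_zero]
        ring

lemma pv_splitOn_eq (l : List Char) :
    List.splitOn '0' l = List.splitOnP (fun c => c == '0') l := by
  simp [List.splitOn]

-- ===== VERDICT (by name: the statement is the Claim_ definition above) =====
theorem numSub_spec : Claim_equal_numSub := by
  intro s _
  show numSub s = numSub_alt s
  have h := pv_key s.toList 0 0
  simp only [Nat.cast_zero] at h
  simp only [numSub, numSub_alt, pv_splitOn_eq]
  rw [show (fun (p : Int × Int) (num : Char) =>
      if num = '1' then (p.1 + 1, p.2)
      else (0, p.2 + PySem.Int.floordiv (p.1 * (p.1 + 1)) 2)) = pvStep by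
    funext p num; simp [pvStep, pvTri]]
  congr 1
  rw [show (fun (r : List Char) => PySem.Int.floordiv ((r.length : Int) * ((r.length : Int) + 1)) 2)
      = (fun r => pvTri (r.length : Int)) by funext r; simp [pvTri]]
  calc (s.toList.foldl pvStep (0, 0)).2 + pvTri (s.toList.foldl pvStep (0, 0)).1
      = 0 + pvS (List.modifyHead (fun r => List.replicate 0 '1' ++ r)
          (List.splitOnP (fun c => c == '0') (s.toList.map (fun c => if c = '1' then c else '0')))) := h
    _ = pvS (List.splitOnP (fun c => c == '0') (s.toList.map (fun c => if c = '1' then c else '0'))) := by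
          simp [pv_modifyHead_id]
    _ = _ := by rfl
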